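-- pv_equiv track=rewrite | github.com/TheGoldKay/codewars | python/7kyu/russian_post_code.py | zipvalidate
-- ===== SOURCE A (Python) =====
-- from dataclasses import dataclass, field
--
-- @dataclass
-- class Check:
--     len: int = 6
--     invalid: str = "05789"
--     span: list[int] = field(default_factory=lambda: [ord('0'), ord('9')])
--
-- def zipvalidate(postcode: str) -> bool:
--     check: Check = Check()
--     if len(postcode) != check.len or postcode[0] in check.invalid:
--         return False
--     for c in postcode:
--         if not (check.span[0] <= ord(c) <= check.span[1]):
--             return False
--     return True
-- ===== SOURCE B (Python) =====
-- def zipvalidate(postcode: str) -> bool: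
--     # Parse the string as a base-10 number by hand; validity is then a pure
--     # range condition: a 6-char all-digit string with first digit in {1,2,3,4,6}
--     # is exactly a value in [100000,499999] or [600000,699999].
--     n = 0
--     for c in postcode:
--         d = ord(c) - 48
--         if d < 0 or d > 9:
--             return False
--         n = n * 10 + d
--     return len(postcode) == 6 and (100000 <= n <= 499999 or 600000 <= n <= 699999)
-- ===== Notes on version B (the rewrite author's own statement) =====
-- stated objective: alternative
-- what changed: B parses the string as a base-10 integer with a hand-rolled accumulator and decides validity by a numeric range test ([100000,499999] or [600000,699999]) plus a length check, instead of A's length guard, first-character blacklist membership and per-character ord-span loop.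
import Mathlib
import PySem

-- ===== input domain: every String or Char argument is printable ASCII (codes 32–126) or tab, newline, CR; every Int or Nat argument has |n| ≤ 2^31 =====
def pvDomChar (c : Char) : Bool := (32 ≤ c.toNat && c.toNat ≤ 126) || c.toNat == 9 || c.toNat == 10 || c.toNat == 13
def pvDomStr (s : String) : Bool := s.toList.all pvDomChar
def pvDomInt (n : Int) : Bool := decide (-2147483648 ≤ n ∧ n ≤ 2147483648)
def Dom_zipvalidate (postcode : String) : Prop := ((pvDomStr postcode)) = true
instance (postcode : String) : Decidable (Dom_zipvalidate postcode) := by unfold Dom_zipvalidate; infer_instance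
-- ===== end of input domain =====

-- B parses the postcode as a base-10 integer and decides validity by a numeric range
-- test plus a length check, instead of A's blacklist + per-char span loop; objective: alternative.


-- ===== PORT A =====
-- Check() is the constant record (len = 6, invalid = "05789", span = [48, 57]); inlined field by field.
def zipvalidate (postcode : String) : Bool :=
  -- if len(postcode) != check.len or postcode[0] in check.invalid: return False
  if postcode.toList.length ≠ 6 ∨ (match PySem.List.pyGet? postcode.toList 0 with
      | some c => "05789".toList.contains c
      | none => false) = true then false
  -- for c in postcode: if not (check.span[0] <= ord(c) <= check.span[1]): return False
  else postcode.toList.all (fun c => decide (48 ≤ c.toNat) && decide (c.toNat ≤ 57))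

-- ===== PORT B =====
-- the for-loop of Source B with its early 'return False' modeled as the none state
def pvAccum : List Char → Int → Option Int
  | [], n => some n
  | c :: cs, n =>
    let d : Int := (c.toNat : Int) - 48
    if d < 0 ∨ d > 9 then none else pvAccum cs (n * 10 + d)

def zipvalidate_alt (postcode : String) : Bool :=
  match pvAccum postcode.toList 0 with
  | none => false
  | some n =>
      PySem.Str.len postcode == 6
        && (decide (100000 ≤ n ∧ n ≤ 499999) || decide (600000 ≤ n ∧ n ≤ 699999))

-- ===== PRECONDITION & SPEC =====
def Spec_zipvalidate (postcode : String) (out : Bool) : Prop := out = zipvalidate_alt postcode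
instance (postcode : String) (out : Bool) : Decidable (Spec_zipvalidate postcode out) := by unfold Spec_zipvalidate; infer_instance

-- ===== CLAIM (what is proved, stated in full; the proofs are below) =====
def Claim_equal_zipvalidate : Prop := ∀ (postcode : String), Dom_zipvalidate postcode → Spec_zipvalidate postcode (zipvalidate postcode)

-- ===== LEMMAS AND PROOFS =====

-- if B's accumulator survives (some), every char was a digit
theorem pvAccum_some_all (cs : List Char) (n m : Int)
    (h : pvAccum cs n = some m) :
    cs.all (fun c => decide (48 ≤ c.toNat) && decide (c.toNat ≤ 57)) = true := by
  induction cs generalizing n with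
  | nil => simp
  | cons c cs ih =>
    simp only [pvAccum] at h
    split_ifs at h with hd
    push_neg at hd
    simp only [List.all_cons, Bool.and_eq_true, decide_eq_true_eq]
    exact ⟨⟨by omega, by omega⟩, ih _ h⟩

-- value and bounds of the accumulator on an all-digit string
theorem pvAccum_bounds (cs : List Char) (n m : Int) (hn : 0 ≤ n)
    (h : pvAccum cs n = some m) :
    n * 10 ^ cs.length ≤ m ∧ m < (n + 1) * 10 ^ cs.length := by
  induction cs generalizing n with
  | nil =>
    simp only [pvAccum, Option.some.injEq] at h
    subst h; simp
  | cons c cs ih =>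
    simp only [pvAccum] at h
    split_ifs at h with hd
    push_neg at hd
    have := ih (n * 10 + ((c.toNat : Int) - 48)) (by omega) h
    simp only [List.length_cons, pow_succ]
    constructor
    · nlinarith [this.1, pow_pos (show (0:Int) < 10 by norm_num) cs.length]
    · nlinarith [this.2, pow_pos (show (0:Int) < 10 by norm_num) cs.length]

theorem pv_char_eq_iff_toNat (c d : Char) : c = d ↔ c.toNat = d.toNat := by
  constructor
  · intro h; rw [h]
  · intro h; exact Char.ext (UInt32.toNat_inj.mp h)

-- the accumulator survives exactly on all-digit strings
theorem pvAccum_isSome (cs : List Char) (n : Int)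
    (h : cs.all (fun c => decide (48 ≤ c.toNat) && decide (c.toNat ≤ 57)) = true) :
    (pvAccum cs n).isSome = true := by
  induction cs generalizing n with
  | nil => simp [pvAccum]
  | cons c cs ih =>
    simp only [List.all_cons, Bool.and_eq_true, decide_eq_true_eq] at h
    simp only [pvAccum]
    split_ifs with hd
    · omega
    · exact ih _ h.2

-- ===== VERDICT (by name: the statement is the Claim_ definition above) =====
theorem zipvalidate_spec : Claim_equal_zipvalidate := by
  intro postcode _
  unfold Spec_zipvalidate zipvalidate zipvalidate_alt
  rcases hacc : pvAccum postcode.toList 0 with _ | n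
  · -- a non-digit char: both sides false
    have hall : postcode.toList.all (fun c => decide (48 ≤ c.toNat) && decide (c.toNat ≤ 57)) = false := by
      by_contra hne
      have := pvAccum_isSome postcode.toList 0 (by revert hne; cases postcode.toList.all (fun c => decide (48 ≤ c.toNat) && decide (c.toNat ≤ 57)) <;> simp)
      rw [hacc] at this; exact Bool.noConfusion this
    split_ifs with h
    · rfl
    · exact hall
  · have hall := pvAccum_some_all postcode.toList 0 n hacc
    by_cases hl : postcode.toList.length = 6
    · rcases hcs : postcode.toList with _ | ⟨c0, rest⟩
      · rw [hcs] at hl; simp at hl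
      · rw [hcs] at hacc hall hl
        simp only [List.length_cons] at hl
        have hrest : rest.length = 5 := by omega
        -- peel the first step of the accumulator
        simp only [pvAccum] at hacc
        split_ifs at hacc with hd
        push_neg at hd
        have hb := pvAccum_bounds rest (0 * 10 + ((c0.toNat : Int) - 48)) n (by omega) hacc
        rw [hrest] at hb
        norm_num at hb
        simp only [hcs, List.length_cons, hrest, PySem.Str.len, PySem.List.pyGet?, PySem.List.pyIdx?]
        rw [hall]
        norm_num
        rw [Bool.eq_iff_iff]
        simp only [Bool.and_eq_true, Bool.not_eq_true', Bool.or_eq_true, decide_eq_true_eq,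
          decide_eq_false_iff_not, show "05789".toList = ['0','5','7','8','9'] from rfl,
          Bool.or_eq_false_iff,
          beq_iff_eq, beq_eq_false_iff_ne, ne_eq, pv_char_eq_iff_toNat,
          show ('0':Char).toNat = 48 from rfl, show ('5':Char).toNat = 53 from rfl,
          show ('7':Char).toNat = 55 from rfl, show ('8':Char).toNat = 56 from rfl,
          show ('9':Char).toNat = 57 from rfl]
        simp only [List.mem_cons, List.not_mem_nil, or_false, pv_char_eq_iff_toNat,
          show ('0' : Char).toNat = 48 from rfl, show ('5' : Char).toNat = 53 from rfl,
          show ('7' : Char).toNat = 55 from rfl, show ('8' : Char).toNat = 56 from rfl,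
          show ('9' : Char).toNat = 57 from rfl]
        omega
    · -- wrong length: both sides false
      split_ifs with h
      · simp only [PySem.Str.len, PySem.Chars.len]
        have h6 : ((postcode.toList.length : Int) == 6) = false := by
          simp only [beq_eq_false_iff_ne, ne_eq]
          omega
        rw [h6, Bool.false_and]
      · exact absurd (Or.inl hl) h
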